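-- pv_equiv track=rewrite | github.com/A-stick-bug/DMOJ | Bruce String.py | cost_to_center
-- ===== SOURCE A (Python) =====
-- def cost_to_center(arr, mid):
--     center = arr[mid]
--     left = right = 1
--     cost = 0
--     for i in arr:
--         if i == center:
--             continue
--         elif i < center:
--             cost += center - i - left
--             left += 1
--         else:
--             cost += i - center - right
--             right += 1
--     return cost
-- ===== SOURCE B (Python) =====
-- def cost_to_center(arr, mid):
--     center = arr[mid]
--     lows = sorted((x for x in arr if x < center), reverse=True)
--     highs = sorted(x for x in arr if x > center)
--     cost = 0
--     for k, x in enumerate(lows, 1):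
--         cost += (center - k) - x
--     for k, x in enumerate(highs, 1):
--         cost += x - (center + k)
--     return cost
-- ===== Notes on version B (the rewrite author's own statement) =====
-- stated objective: alternative
-- what changed: B splits the array into the elements below and above the center, sorts each side (descending/ascending), and pairs each sorted element with its explicit target slot center-k / center+k, summing the gaps; A is a single pass with two running counters folded into the sum.
import Mathlib
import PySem

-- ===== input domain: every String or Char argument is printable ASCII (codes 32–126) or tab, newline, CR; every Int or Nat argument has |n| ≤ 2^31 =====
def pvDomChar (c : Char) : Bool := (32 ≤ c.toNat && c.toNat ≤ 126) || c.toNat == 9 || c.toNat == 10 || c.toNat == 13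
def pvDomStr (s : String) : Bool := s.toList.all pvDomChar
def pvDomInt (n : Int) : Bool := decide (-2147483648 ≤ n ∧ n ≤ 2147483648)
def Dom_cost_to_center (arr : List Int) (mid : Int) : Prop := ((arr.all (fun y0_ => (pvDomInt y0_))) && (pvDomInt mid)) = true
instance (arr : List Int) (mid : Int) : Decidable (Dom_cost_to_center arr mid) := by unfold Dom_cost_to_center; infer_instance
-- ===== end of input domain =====

-- B sorts each side and pairs elements with explicit target slots center±k, instead of A's
-- single pass with running counters (objective: alternative).

-- ===== PORT A =====
def cost_to_center (arr : List Int) (mid : Int) : Int :=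
  let center := (PySem.List.pyGet? arr mid).getD 0  -- Pre_ excludes the IndexError case (pyGet? = none)
  let s := arr.foldl (fun (st : Int × Int × Int) i =>
    let (left, right, cost) := st
    if i = center then st
    else if i < center then (left + 1, right, cost + (center - i - left))
    else (left, right + 1, cost + (i - center - right))) (1, 1, 0)
  s.2.2

-- ===== PORT B =====
def cost_to_center_alt (arr : List Int) (mid : Int) : Int :=
  let center := (PySem.List.pyGet? arr mid).getD 0  -- Pre_ excludes the IndexError case (pyGet? = none)
  let lows := PySem.List.sorted (arr.filter (fun x => decide (x < center))) (fun x => x) true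
  let highs := PySem.List.sorted (arr.filter (fun x => decide (center < x))) (fun x => x) false
  -- for k, x in enumerate(lows, 1): cost += (center - k) - x
  let s1 := lows.foldl (fun (st : Int × Int) x => (st.1 + ((center - st.2) - x), st.2 + 1)) (0, 1)
  -- for k, x in enumerate(highs, 1): cost += x - (center + k)
  let s2 := highs.foldl (fun (st : Int × Int) x => (st.1 + (x - (center + st.2)), st.2 + 1)) (s1.1, 1)
  s2.1

-- ===== PRECONDITION & SPEC =====
-- Pre_ excludes exactly the inputs where Python A raises IndexError: mid out of range (incl. any mid on []).
def Pre_cost_to_center (arr : List Int) (mid : Int) : Prop :=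
  -(arr.length : Int) ≤ mid ∧ mid < (arr.length : Int)
instance (arr : List Int) (mid : Int) : Decidable (Pre_cost_to_center arr mid) := by
  unfold Pre_cost_to_center; infer_instance
def pvWitness_cost_to_center : List Int × Int := ([3, 1, 4, 1, 5], 2)
def Spec_cost_to_center (arr : List Int) (mid : Int) (out : Int) : Prop := out = cost_to_center_alt arr mid
instance (arr : List Int) (mid : Int) (out : Int) : Decidable (Spec_cost_to_center arr mid out) := by unfold Spec_cost_to_center; infer_instance

-- ===== CLAIM (what is proved, stated in full; the proofs are below) =====
def Claim_equal_cost_to_center : Prop := ∀ (arr : List Int) (mid : Int), Dom_cost_to_center arr mid → Pre_cost_to_center arr mid → Spec_cost_to_center arr mid (cost_to_center arr mid)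

-- ===== LEMMAS AND PROOFS =====

-- K + (K+1) + ... + (K+n-1)
def pvSumRange (K : Int) : Nat → Int
  | 0 => 0
  | n + 1 => K + pvSumRange (K + 1) n

-- B's low-side loop: plain distance sum minus the consecutive target offsets
theorem pv_foldLow (c : Int) (l : List Int) : ∀ (C K : Int),
    (l.foldl (fun (st : Int × Int) x => (st.1 + ((c - st.2) - x), st.2 + 1)) (C, K)).1
      = C + (l.map (fun x => c - x)).sum - pvSumRange K l.length := by
  induction l with
  | nil => intro C K; simp [pvSumRange]
  | cons x t ih =>
    intro C K
    simp only [List.foldl_cons, List.map_cons, List.sum_cons, List.length_cons, pvSumRange, ih]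
    ring

-- B's high-side loop
theorem pv_foldHigh (c : Int) (l : List Int) : ∀ (C K : Int),
    (l.foldl (fun (st : Int × Int) x => (st.1 + (x - (c + st.2)), st.2 + 1)) (C, K)).1
      = C + (l.map (fun x => x - c)).sum - pvSumRange K l.length := by
  induction l with
  | nil => intro C K; simp [pvSumRange]
  | cons x t ih =>
    intro C K
    simp only [List.foldl_cons, List.map_cons, List.sum_cons, List.length_cons, pvSumRange, ih]
    ring

-- A's loop characterised: distance sums over the two filtered sides minus the counter offsets
theorem pv_foldA (c : Int) (l : List Int) : ∀ (L R c0 : Int),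
    (l.foldl (fun (st : Int × Int × Int) i =>
      let (left, right, cost) := st
      if i = c then st
      else if i < c then (left + 1, right, cost + (c - i - left))
      else (left, right + 1, cost + (i - c - right))) (L, R, c0)).2.2
    = c0 + ((l.filter (fun x => decide (x < c))).map (fun x => c - x)).sum
        + ((l.filter (fun x => decide (c < x))).map (fun x => x - c)).sum
        - pvSumRange L (l.filter (fun x => decide (x < c))).length
        - pvSumRange R (l.filter (fun x => decide (c < x))).length := by
  induction l with
  | nil => intro L R c0; simp [pvSumRange]
  | cons i t ih =>
    intro L R c0
    by_cases h1 : i < c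
    · simp only [List.foldl_cons, List.filter_cons, if_neg (by omega : ¬ i = c), if_pos h1,
        decide_eq_true h1, decide_eq_false (by omega : ¬ c < i), Bool.false_eq_true, if_true,
        if_false, List.map_cons, List.sum_cons, List.length_cons, pvSumRange, ih]
      ring
    · by_cases h2 : c < i
      · simp only [List.foldl_cons, List.filter_cons, if_neg (by omega : ¬ i = c), if_neg h1,
          decide_eq_true h2, decide_eq_false h1, Bool.false_eq_true, if_true, if_false,
          List.map_cons, List.sum_cons, List.length_cons, pvSumRange, ih]
        ring
      · have he : i = c := by omega
        simp only [List.foldl_cons, if_pos he, List.filter_cons,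
          decide_eq_false h1, decide_eq_false h2, Bool.false_eq_true, if_false, ih]

-- ===== VERDICT (by name: the statement is the Claim_ definition above) =====
theorem cost_to_center_spec : Claim_equal_cost_to_center := by
  intro arr mid _ _
  show cost_to_center arr mid = cost_to_center_alt arr mid
  unfold cost_to_center cost_to_center_alt
  set c := (PySem.List.pyGet? arr mid).getD 0 with hc
  have hA := pv_foldA c arr 1 1 0
  have hpl := PySem.List.sorted_perm (arr.filter (fun x => decide (x < c))) (fun x => x) true
  have hph := PySem.List.sorted_perm (arr.filter (fun x => decide (c < x))) (fun x => x) false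
  have hsl := (hpl.map (fun x => c - x)).sum_eq
  have hsh := (hph.map (fun x => x - c)).sum_eq
  have hll := hpl.length_eq
  have hlh := hph.length_eq
  simp only []
  rw [hA, pv_foldHigh, pv_foldLow, hsl, hsh, hll, hlh]
  ring
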